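-- pv_equiv track=rewrite | github.com/natori-hrj/LeetCode | hard/3068_FindtheMaximumSUmofNodeValues.py | maximumValueSum
-- ===== SOURCE A (Python) =====
-- def maximumValueSum(
--
--     nums: list[int],
--     k: int,
--     edges: list[list[int]],
-- ) -> int:
--     xor_values = [num ^ k for num in nums]
--     total = 0
--     diffs = []
--
--     for original, xor_val in zip(nums, xor_values):
--         if xor_val > original:
--             total += xor_val
--             diffs.append(xor_val - original)
--         else:
--             total += original
--             diffs.append(original - xor_val)
--
--     changed_count = sum(xor_val > num for num, xor_val in zip(nums, xor_values))
--
--     if changed_count % 2 == 0: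
--         return total
--     else:
--         min_diff = min(diffs)
--         return total - min_diff
-- ===== SOURCE B (Python) =====
-- def maximumValueSum(
--     nums: list[int],
--     k: int,
--     edges: list[list[int]],
-- ) -> int:
--     # Two-state DP: f0 = best sum with an even number of XOR applications so far,
--     # f1 = best with an odd number (None until a flip is possible). Edges are irrelevant.
--     f0, f1 = 0, None
--     for num in nums:
--         x = num ^ k
--         if f1 is None:
--             f0, f1 = f0 + num, f0 + x
--         else:
--             f0, f1 = max(f0 + num, f1 + x), max(f1 + num, f0 + x)
--     return f0
-- ===== Notes on version B (the rewrite author's own statement) =====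
-- stated objective: alternative
-- what changed: Replaced the greedy sum-of-maxima with a parity-correction step (diffs list, changed-count, min(diffs)) by a single-pass two-state dynamic program tracking the best sum with an even and with an odd number of XOR flips.
import Mathlib
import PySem

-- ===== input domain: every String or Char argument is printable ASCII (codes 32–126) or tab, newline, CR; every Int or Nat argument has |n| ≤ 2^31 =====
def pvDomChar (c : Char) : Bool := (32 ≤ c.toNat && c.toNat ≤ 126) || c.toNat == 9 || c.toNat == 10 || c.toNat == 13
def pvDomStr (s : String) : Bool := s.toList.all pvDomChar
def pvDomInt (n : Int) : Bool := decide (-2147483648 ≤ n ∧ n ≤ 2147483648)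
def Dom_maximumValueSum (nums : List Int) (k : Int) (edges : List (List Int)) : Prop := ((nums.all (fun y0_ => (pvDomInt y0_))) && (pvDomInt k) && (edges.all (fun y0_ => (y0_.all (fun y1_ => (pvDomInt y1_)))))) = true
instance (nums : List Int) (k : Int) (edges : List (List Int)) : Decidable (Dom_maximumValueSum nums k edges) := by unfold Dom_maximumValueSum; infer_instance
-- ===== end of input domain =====

-- B replaces A's greedy-plus-parity-correction (diffs list, changed count, min diff)
-- by a single-pass two-state DP over even/odd numbers of XOR flips (objective: alternative).

-- ===== PORT A =====
def maximumValueSum (nums : List Int) (k : Int) (edges : List (List Int)) : Int :=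
  let xor_values := nums.map (fun num => PySem.Int.bxor num k)
  let zipped := nums.zip xor_values
  let st := zipped.foldl (fun (st : Int × List Int) p =>
      if p.2 > p.1 then (st.1 + p.2, st.2 ++ [p.2 - p.1])
      else (st.1 + p.1, st.2 ++ [p.1 - p.2])) (0, ([] : List Int))
  let changed_count : Int := zipped.foldl (fun (acc : Int) p => acc + (if p.2 > p.1 then 1 else 0)) 0
  if PySem.Int.mod changed_count 2 = 0 then st.1
  else
    -- min(diffs): Python raises on an empty list, unreachable here (odd count forces nonempty)
    match PySem.List.min? st.2 (fun x => x) with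
    | some m => st.1 - m
    | none => 0

-- ===== PORT B =====
-- step of Source B's loop: state (f0, f1), f1 = none encodes Python's f1 is None
def pvBStep (k : Int) (s : Int × Option Int) (num : Int) : Int × Option Int :=
  let x := PySem.Int.bxor num k
  match s.2 with
  | none => (s.1 + num, some (s.1 + x))
  | some g => (max (s.1 + num) (g + x), some (max (g + num) (s.1 + x)))

def maximumValueSum_alt (nums : List Int) (k : Int) (edges : List (List Int)) : Int :=
  (nums.foldl (pvBStep k) (0, none)).1

-- ===== PRECONDITION & SPEC =====
def Spec_maximumValueSum (nums : List Int) (k : Int) (edges : List (List Int)) (out : Int) : Prop := out = maximumValueSum_alt nums k edges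
instance (nums : List Int) (k : Int) (edges : List (List Int)) (out : Int) : Decidable (Spec_maximumValueSum nums k edges out) := by unfold Spec_maximumValueSum; infer_instance

-- ===== CLAIM (what is proved, stated in full; the proofs are below) =====
def Claim_equal_maximumValueSum : Prop := ∀ (nums : List Int) (k : Int) (edges : List (List Int)), Dom_maximumValueSum nums k edges → Spec_maximumValueSum nums k edges (maximumValueSum nums k edges)

-- ===== LEMMAS AND PROOFS =====

-- abstract summary of a prefix: (sum of maxima, parity of flips, min |diff| so far)
def pvHi (k n : Int) : Int := max n (PySem.Int.bxor n k)
def pvDd (k n : Int) : Int := |PySem.Int.bxor n k - n|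
def pvFlip (k n : Int) : Bool := decide (PySem.Int.bxor n k > n)

def pvAbsStep (k : Int) (s : Int × Bool × Option Int) (n : Int) : Int × Bool × Option Int :=
  (s.1 + pvHi k n, xor s.2.1 (pvFlip k n),
   some (match s.2.2 with | none => pvDd k n | some m => min m (pvDd k n)))

def pvAbsF (k : Int) (l : List Int) : Int × Bool × Option Int :=
  l.foldl (pvAbsStep k) (0, false, none)

def pvInv (s : Int × Bool × Option Int) : Prop :=
  match s.2.2 with | none => s.2.1 = false | some m => 0 ≤ m

def pvConc (s : Int × Bool × Option Int) : Int × Option Int :=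
  match s.2.2 with
  | none => (s.1, none)
  | some m => (s.1 - (if s.2.1 then m else 0), some (s.1 - (if s.2.1 then 0 else m)))

theorem pvDd_eq (k n : Int) :
    pvDd k n = if PySem.Int.bxor n k > n then PySem.Int.bxor n k - n else n - PySem.Int.bxor n k := by
  unfold pvDd
  by_cases hx : PySem.Int.bxor n k > n
  · rw [if_pos hx, abs_of_nonneg (by omega)]
  · rw [if_neg hx, abs_of_nonpos (by omega)]; ring

theorem pvDd_nonneg (k n : Int) : 0 ≤ pvDd k n := abs_nonneg _

theorem pvInv_step (k : Int) (s : Int × Bool × Option Int) (n : Int) (h : pvInv s) :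
    pvInv (pvAbsStep k s n) := by
  obtain ⟨t, c, om⟩ := s
  have hd := pvDd_nonneg k n
  cases om with
  | none => simpa [pvInv, pvAbsStep] using hd
  | some m =>
    simp [pvInv, pvAbsStep] at *
    exact ⟨h, hd⟩

theorem pvInv_absF (k : Int) (l : List Int) : pvInv (pvAbsF k l) := by
  induction l using List.reverseRecOn with
  | nil => simp [pvAbsF, pvInv]
  | append_singleton l n ih =>
    unfold pvAbsF at *
    rw [List.foldl_append]
    exact pvInv_step k _ n ih

theorem pvCommute (k : Int) (s : Int × Bool × Option Int) (n : Int) (h : pvInv s) :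
    pvBStep k (pvConc s) n = pvConc (pvAbsStep k s n) := by
  obtain ⟨t, c, om⟩ := s
  have hdd := pvDd_eq k n
  cases om with
  | none =>
    simp [pvInv] at h
    subst h
    by_cases hx : PySem.Int.bxor n k > n <;>
      simp [pvBStep, pvConc, pvAbsStep, pvHi, pvFlip, hx, hdd, max_def] <;>
      split_ifs <;> omega
  | some m =>
    simp [pvInv] at h
    by_cases hx : PySem.Int.bxor n k > n <;> cases c <;>
      simp [pvBStep, pvConc, pvAbsStep, pvHi, pvFlip, hx, hdd, max_def, min_def] <;>
      split_ifs <;> omega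

theorem pvB_eq (k : Int) (l : List Int) :
    l.foldl (pvBStep k) (0, none) = pvConc (pvAbsF k l) := by
  induction l using List.reverseRecOn with
  | nil => simp [pvAbsF, pvConc]
  | append_singleton l n ih =>
    unfold pvAbsF
    simp only [List.foldl_append, List.foldl_cons, List.foldl_nil]
    rw [ih]
    exact pvCommute k _ n (pvInv_absF k l)

-- A-side closed forms
def pvDl (k : Int) (l : List Int) : List Int := l.map (pvDd k)

def pvCc (k : Int) (l : List Int) : Int :=
  l.foldl (fun (acc : Int) n => acc + (if PySem.Int.bxor n k > n then 1 else 0)) 0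

theorem pvA_fold (k : Int) (l : List Int) :
    l.foldl (fun (st : Int × List Int) n =>
      if PySem.Int.bxor n k > n then (st.1 + PySem.Int.bxor n k, st.2 ++ [PySem.Int.bxor n k - n])
      else (st.1 + n, st.2 ++ [n - PySem.Int.bxor n k])) (0, ([] : List Int))
    = ((pvAbsF k l).1, pvDl k l) := by
  induction l using List.reverseRecOn with
  | nil => simp [pvAbsF, pvDl]
  | append_singleton l n ih =>
    unfold pvAbsF pvDl at *
    simp only [List.foldl_append, List.foldl_cons, List.foldl_nil, List.map_append, List.map]
    rw [ih]
    by_cases hx : PySem.Int.bxor n k > n <;>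
      simp [pvAbsStep, pvHi, pvDd_eq, hx, max_def] <;> omega

theorem pvParity (k : Int) (l : List Int) :
    (pvAbsF k l).2.1 = decide (¬ PySem.Int.mod (pvCc k l) 2 = 0) := by
  induction l using List.reverseRecOn with
  | nil => simp [pvAbsF, pvCc, PySem.Int.mod]
  | append_singleton l n ih =>
    unfold pvAbsF pvCc at *
    simp only [List.foldl_append, List.foldl_cons, List.foldl_nil, pvAbsStep]
    rw [ih]
    rw [PySem.Int.mod_eq_emod_of_pos (by norm_num), PySem.Int.mod_eq_emod_of_pos (by norm_num)]
    set c := l.foldl (fun (acc : Int) n => acc + (if PySem.Int.bxor n k > n then 1 else 0)) 0 with hc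
    by_cases hx : PySem.Int.bxor n k > n <;>
      by_cases hm : c % 2 = 0 <;>
      simp [pvFlip, hx, hm] <;> omega

theorem pvMin_fold (k : Int) (l : List Int) :
    (pvAbsF k l).2.2 = match pvDl k l with
      | [] => none
      | x :: t => some (t.foldl min x) := by
  induction l using List.reverseRecOn with
  | nil => simp [pvAbsF, pvDl]
  | append_singleton l n ih =>
    unfold pvAbsF pvDl at *
    simp only [List.foldl_append, List.foldl_cons, List.foldl_nil, List.map_append, List.map]
    rcases hl : l.map (pvDd k) with _ | ⟨x, t⟩ <;> rw [hl] at ih <;>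
      simp [pvAbsStep, ih, List.foldl_append]

theorem pvMin (k : Int) (l : List Int) :
    PySem.List.min? (pvDl k l) (fun x => x) = (pvAbsF k l).2.2 := by
  rw [pvMin_fold]
  rcases hl : pvDl k l with _ | ⟨x, t⟩
  · simp [PySem.List.min?]
  · exact PySem.List.min?_id_cons x t

theorem pvZipMap (k : Int) (l : List Int) :
    l.zip (l.map (fun num => PySem.Int.bxor num k)) = l.map (fun n => (n, PySem.Int.bxor n k)) := by
  induction l with
  | nil => rfl
  | cons a t ih => simp [ih]

-- ===== VERDICT (by name: the statement is the Claim_ definition above) =====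
theorem maximumValueSum_spec : Claim_equal_maximumValueSum := by
  intro nums k edges _
  unfold Spec_maximumValueSum
  simp only [maximumValueSum, maximumValueSum_alt]
  rw [pvB_eq, pvZipMap]
  simp only [List.foldl_map]
  rw [pvA_fold, pvMin]
  have hcc : nums.foldl (fun (acc : Int) n => acc + (if PySem.Int.bxor n k > n then 1 else 0)) 0
      = pvCc k nums := rfl
  rw [hcc]
  have hp := pvParity k nums
  have hinv := pvInv_absF k nums
  have hEq : PySem.Int.mod (pvCc k nums) 2 = pvCc k nums % 2 :=
    PySem.Int.mod_eq_emod_of_pos (by norm_num)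
  rcases hE : pvAbsF k nums with ⟨t, c, om⟩
  rw [hE] at hp hinv
  have hc : c = decide (pvCc k nums % 2 = 1) := by
    simpa [hEq] using hp
  cases om with
  | none =>
    simp only [pvInv] at hinv
    have hm2 : pvCc k nums % 2 = 0 := by
      rw [hinv] at hc
      simp at hc
      omega
    have hmod : PySem.Int.mod (pvCc k nums) 2 = 0 := by rw [hEq]; exact hm2
    simp [pvConc]
    omega
  | some m =>
    by_cases hm2 : pvCc k nums % 2 = 0
    · have hmod : PySem.Int.mod (pvCc k nums) 2 = 0 := by rw [hEq]; exact hm2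
      have hcf : c = false := by rw [hc]; simp; omega
      subst hcf
      simp [pvConc]
      omega
    · have hmod : ¬ PySem.Int.mod (pvCc k nums) 2 = 0 := by rw [hEq]; exact hm2
      have hct : c = true := by rw [hc]; simp; omega
      subst hct
      simp [pvConc]
      omega
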